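-- pv_equiv track=rewrite | github.com/thelmick-unicon/lif-core | components/lif/semantic_search_service/core.py | paths_to_graphql_fields
-- ===== SOURCE A (Python) =====
-- from collections import defaultdict
-- from typing import Annotated, Any, Dict, List, Optional, Tuple, Type
--
-- def paths_to_graphql_fields(paths: List[str]) -> str:
--     """Convert dotted paths into a nested GraphQL field string."""
--     split_paths = [p.split(".") for p in paths]
--     if not split_paths:
--         return ""
--     min_len = min(map(len, split_paths))
--     common_root_len = 0
--     for i in range(min_len):
--         val = split_paths[0][i]
--         if all(p[i] == val for p in split_paths):
--             common_root_len += 1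
--         else:
--             break
--     trimmed_paths = [p[common_root_len:] for p in split_paths]
--
--     def build_tree(paths):
--         """Build a nested tree from a list of paths."""
--         tree = defaultdict(list)
--         for path in paths:
--             if path:
--                 tree[path[0]].append(path[1:])
--         return {k: build_tree(v) for k, v in tree.items()}
--
--     def to_graphql(tree, indent=0):
--         """Recursively convert a tree to a GraphQL field string."""
--         lines = []
--         for key, subtree in sorted(tree.items()):
--             if subtree:
--                 lines.append("  " * indent + f"{key} " + "{")
--                 lines.append(to_graphql(subtree, indent + 1))
--                 lines.append("  " * indent + "}")
--             else:
--                 lines.append("  " * indent + key)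
--         return "\n".join(lines)
--
--     tree = build_tree(trimmed_paths)
--     return to_graphql(tree)
-- ===== SOURCE B (Python) =====
-- def paths_to_graphql_fields(paths):
--     """Convert dotted paths into a nested GraphQL field string."""
--     split_paths = [p.split(".") for p in paths]
--     if not split_paths:
--         return ""
--     min_len = min(map(len, split_paths))
--     common_root_len = 0
--     for i in range(min_len):
--         val = split_paths[0][i]
--         if all(p[i] == val for p in split_paths):
--             common_root_len += 1
--         else:
--             break
--     # Insert each trimmed path independently into one nested dict (trie).
--     root = {}
--     for p in split_paths:
--         node = root
--         for part in p[common_root_len:]: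
--             node = node.setdefault(part, {})
--     # Emit the trie into a flat list of lines, one append per line.
--     lines = []
--
--     def emit(node, indent):
--         for key, child in sorted(node.items()):
--             if child:
--                 lines.append("  " * indent + key + " {")
--                 emit(child, indent + 1)
--                 lines.append("  " * indent + "}")
--             else:
--                 lines.append("  " * indent + key)
--
--     emit(root, 0)
--     return "\n".join(lines)
-- ===== Notes on version B (the rewrite author's own statement) =====
-- stated objective: simpler
-- what changed: Replaces the recursive group-by-first-segment build_tree (a defaultdict of sublists rebuilt at every level) with a single iterative pass that walks a cursor down one shared trie via setdefault per path, and replaces the nested join-of-joins emitter with a flat accumulator list of lines joined once.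
import Mathlib
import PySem

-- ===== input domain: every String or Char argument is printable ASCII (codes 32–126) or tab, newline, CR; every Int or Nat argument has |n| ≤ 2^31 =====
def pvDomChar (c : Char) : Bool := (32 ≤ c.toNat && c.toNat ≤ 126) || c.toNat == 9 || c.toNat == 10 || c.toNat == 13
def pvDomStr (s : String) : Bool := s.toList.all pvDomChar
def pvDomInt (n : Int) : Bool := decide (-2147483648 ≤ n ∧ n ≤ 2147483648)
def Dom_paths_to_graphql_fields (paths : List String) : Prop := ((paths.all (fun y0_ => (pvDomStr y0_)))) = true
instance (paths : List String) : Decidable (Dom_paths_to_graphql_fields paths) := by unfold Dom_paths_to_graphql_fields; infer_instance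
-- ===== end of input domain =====

-- B replaces A's recursive group-by-first-segment tree construction with a single
-- iterative per-path insertion into one trie, and A's nested join-of-joins emitter
-- with a flat accumulated list of lines joined once (objective: simpler).

-- ===== PORT A =====

-- The nested dict {str: subdict} trie: Forest.cons key child rest  ≙  one (key, child) item followed by the rest.
inductive Forest where
  | nil : Forest
  | cons : String → Forest → Forest → Forest
deriving DecidableEq, Repr

def Forest.items : Forest → List (String × Forest)
  | .nil => []
  | .cons k c r => (k, c) :: r.items

-- "  " * indent
def indentStr (n : Nat) : String := PySem.Str.join "" (List.replicate n "  ")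

-- shared by both ports (identical code in both Pythons): the common-root counting loop
def commonLen (sps : List (List String)) (minLen i : Nat) : Nat :=
  if i < minLen then
    if sps.all (fun p => p.getD i "" == (sps.headD []).getD i "") then
      1 + commonLen sps minLen (i + 1)
    else 0
  else 0
termination_by minLen - i

-- build_tree: group by first segment via the defaultdict(list) loop, then recurse on each
-- bucket; fuel = (total number of segments + 1) at the top call, which the recursion never
-- exhausts (each bucket element is a proper tail), so the fuel guard only makes it total.
mutual
def buildTree : Nat → List (List String) → Forest
  | 0, _ => .nil
  | fuel + 1, ps =>
      let d := ps.foldl (fun d p =>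
        match p with
        | [] => d
        | h :: t => d.insert h (d.getD h [] ++ [t])) (PySem.Dict.empty : PySem.Dict String (List (List String)))
      mapItems fuel d.items
termination_by fuel _ => (fuel, 0)
def mapItems : Nat → List (String × List (List String)) → Forest
  | _, [] => .nil
  | fuel, (k, v) :: rest => .cons k (buildTree fuel v) (mapItems fuel rest)
termination_by fuel l => (fuel, l.length + 1)
end

-- to_graphql: build the lines list (a subtree contributes its own joined string as ONE
-- element), then join; fuel only makes the recursion total, as above.
mutual
def toGraphql : Nat → Forest → Nat → String
  | 0, _, _ => ""
  | fuel + 1, f, indent =>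
      PySem.Str.join "\n" (emitLines fuel (PySem.List.sorted f.items (fun p => p.1) false) indent)
termination_by fuel _ _ => (fuel, 0)
def emitLines : Nat → List (String × Forest) → Nat → List String
  | _, [], _ => []
  | fuel, (k, sub) :: rest, indent =>
      (if sub ≠ Forest.nil then
        [indentStr indent ++ k ++ " {", toGraphql fuel sub (indent + 1), indentStr indent ++ "}"]
      else [indentStr indent ++ k]) ++ emitLines fuel rest indent
termination_by fuel l _ => (fuel, l.length + 1)
end

def paths_to_graphql_fields (paths : List String) : String :=
  let sps := paths.map (fun p => (PySem.Str.split? p ".").getD [])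
  if sps = [] then ""
  else
    let minLen := (PySem.List.min? (sps.map List.length) (fun x => x)).getD 0
    let crl := commonLen sps minLen 0
    let trimmed := sps.map (fun p => PySem.List.slice p (some (crl : Int)) none)
    let fuel := (trimmed.map List.length).sum + 1
    toGraphql fuel (buildTree fuel trimmed) 0

-- ===== PORT B =====

-- node = root; for part in p: node = node.setdefault(part, {})  — functional rendering of
-- the cursor walk: rebuild along the looked-up spine, append a fresh chain for new keys.
def insertPath : Forest → List String → Forest
  | f, [] => f
  | .nil, p :: rest => .cons p (insertPath .nil rest) .nil
  | .cons k c r, p :: rest =>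
      if k = p then .cons k (insertPath c rest) r
      else .cons k c (insertPath r (p :: rest))
termination_by f path => (path.length, sizeOf f)

-- emit: append flat lines one by one (fuel only makes the recursion total)
mutual
def linesB : Nat → Forest → Nat → List String
  | 0, _, _ => []
  | fuel + 1, f, indent => linesItems fuel (PySem.List.sorted f.items (fun p => p.1) false) indent
termination_by fuel _ _ => (fuel, 0)
def linesItems : Nat → List (String × Forest) → Nat → List String
  | _, [], _ => []
  | fuel, (k, sub) :: rest, indent =>
      (if sub ≠ Forest.nil then
        [indentStr indent ++ k ++ " {"] ++ linesB fuel sub (indent + 1) ++ [indentStr indent ++ "}"]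
      else [indentStr indent ++ k]) ++ linesItems fuel rest indent
termination_by fuel l _ => (fuel, l.length + 1)
end

def paths_to_graphql_fields_alt (paths : List String) : String :=
  let sps := paths.map (fun p => (PySem.Str.split? p ".").getD [])
  if sps = [] then ""
  else
    let minLen := (PySem.List.min? (sps.map List.length) (fun x => x)).getD 0
    let crl := commonLen sps minLen 0
    let root := sps.foldl (fun root p => insertPath root (PySem.List.slice p (some (crl : Int)) none)) Forest.nil
    let fuel := (sps.map (fun p => (PySem.List.slice p (some (crl : Int)) none).length)).sum + 1
    PySem.Str.join "\n" (linesB fuel root 0)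

-- ===== PRECONDITION & SPEC =====
def Spec_paths_to_graphql_fields (paths : List String) (out : String) : Prop := out = paths_to_graphql_fields_alt paths
instance (paths : List String) (out : String) : Decidable (Spec_paths_to_graphql_fields paths out) := by unfold Spec_paths_to_graphql_fields; infer_instance

-- ===== CLAIM (what is proved, stated in full; the proofs are below) =====
def Claim_equal_paths_to_graphql_fields : Prop := ∀ (paths : List String), Dom_paths_to_graphql_fields paths → Spec_paths_to_graphql_fields paths (paths_to_graphql_fields paths)

-- ===== LEMMAS AND PROOFS =====

-- proof-only measures
def maxLen (ps : List (List String)) : Nat := ps.foldr (fun p m => max p.length m) 0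

def Forest.depth : Forest → Nat
  | .nil => 0
  | .cons _ c r => max (c.depth + 1) r.depth

-- the grouping step of A's build loop, named for the lemmas
def stepG (d : PySem.Dict String (List (List String))) (p : List String) :
    PySem.Dict String (List (List String)) :=
  match p with
  | [] => d
  | h :: t => d.insert h (d.getD h [] ++ [t])

lemma maxLen_le_iff (ps : List (List String)) (n : Nat) :
    maxLen ps ≤ n ↔ ∀ p ∈ ps, p.length ≤ n := by
  induction ps with
  | nil => simp [maxLen]
  | cons p t ih =>
      simp only [maxLen, List.foldr_cons, List.mem_cons, max_le_iff] at ih ⊢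
      constructor
      · rintro ⟨h1, h2⟩ a (rfl | ha)
        · exact h1
        · exact ih.mp h2 a ha
      · intro h
        exact ⟨h p (Or.inl rfl), ih.mpr (fun a ha => h a (Or.inr ha))⟩

lemma getD_foldG (ps : List (List String)) (d : PySem.Dict String (List (List String))) (k : String) :
    (ps.foldl stepG d).getD k [] =
      d.getD k [] ++ ps.filterMap (fun p =>
        match p with
        | [] => none
        | h :: t => if h = k then some t else none) := by
  induction ps generalizing d with
  | nil => simp
  | cons p t ih =>
      cases p with
      | nil => simpa [stepG] using ih d
      | cons h tl =>
          rw [List.foldl_cons, ih]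
          simp only [stepG, List.filterMap_cons, PySem.Dict.getD_insert]
          by_cases hk : h = k
          · subst hk; simp
          · simp [hk, Ne.symm hk]

lemma nodup_foldG (ps : List (List String)) (d : PySem.Dict String (List (List String)))
    (h : d.keys.Nodup) : (ps.foldl stepG d).keys.Nodup := by
  induction ps generalizing d with
  | nil => exact h
  | cons p t ih =>
      cases p with
      | nil => exact ih d h
      | cons a tl => exact ih _ (PySem.Dict.nodup_keys_insert _ _ _ h)

lemma bucket_mem (ps : List (List String)) {k : String} {v : List (List String)}
    (hkv : (k, v) ∈ (ps.foldl stepG PySem.Dict.empty).items) {u : List String} (hu : u ∈ v) :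
    (k :: u) ∈ ps := by
  have hnd : (ps.foldl stepG PySem.Dict.empty).keys.Nodup :=
    nodup_foldG ps _ (by simp [PySem.Dict.empty, PySem.Dict.keys, PySem.Dict.items])
  have hv : (ps.foldl stepG PySem.Dict.empty).getD k [] = v :=
    PySem.Dict.getD_of_mem_items _ hkv hnd []
  rw [getD_foldG] at hv
  simp only [PySem.Dict.getD_empty, List.nil_append] at hv
  subst hv
  rcases List.mem_filterMap.mp hu with ⟨p, hp, he⟩
  cases p with
  | nil => simp at he
  | cons h tl =>
      simp only at he
      split at he
      · rename_i hh; cases he; subst hh; exact hp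
      · cases he

lemma buildTree_nil (fuel : Nat) : buildTree fuel [] = .nil := by
  cases fuel <;> simp [buildTree, mapItems, PySem.Dict.empty]

lemma len_le_maxLen {ps : List (List String)} {p : List String} (h : p ∈ ps) :
    p.length ≤ maxLen ps := (maxLen_le_iff ps (maxLen ps)).mp le_rfl p h

lemma stepG_eq : (fun (d : PySem.Dict String (List (List String))) (p : List String) =>
    match p with
    | [] => d
    | h :: t => d.insert h (d.getD h [] ++ [t])) = stepG := rfl

lemma walk' (t : List String) (fu : Nat)
    (IH : ∀ v, maxLen v ≤ fu → insertPath (buildTree fu v) t = buildTree fu (v ++ [t]))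
    (h : String) :
    ∀ (l : List (String × List (List String))),
      (∀ p ∈ l, maxLen p.2 ≤ fu) → (l.map Prod.fst).Nodup →
      insertPath (mapItems fu l) (h :: t) =
        if h ∈ l.map Prod.fst
        then mapItems fu (l.map (fun p => if p.1 = h then (p.1, p.2 ++ [t]) else p))
        else mapItems fu (l ++ [(h, [t])]) := by
  intro l
  induction l with
  | nil =>
      intro _ _
      simp only [List.map_nil, List.not_mem_nil, if_false, List.nil_append]
      have h0 : insertPath (buildTree fu []) t = buildTree fu [t] := by
        simpa using IH [] (by simp [maxLen])
      rw [buildTree_nil] at h0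
      simp [insertPath, mapItems, h0]
  | cons kv rest ih =>
      obtain ⟨k, v⟩ := kv
      intro hb hnd
      simp only [List.map_cons, List.nodup_cons] at hnd
      have hbv : maxLen v ≤ fu := hb (k, v) (List.mem_cons_self ..)
      have hbrest : ∀ p ∈ rest, maxLen p.2 ≤ fu := fun p hp => hb p (List.mem_cons_of_mem _ hp)
      by_cases hkh : k = h
      · subst hkh
        simp only [mapItems, insertPath, if_pos rfl, List.map_cons, List.mem_cons]
        rw [IH v hbv]
        have hrest : rest.map (fun p => if p.1 = k then (p.1, p.2 ++ [t]) else p) = rest := by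
          rw [List.map_congr_left (g := id), List.map_id]
          intro p hp
          have : p.1 ≠ k := fun hc => hnd.1 (hc ▸ List.mem_map_of_mem hp)
          simp [this]
        simp [mapItems, hrest]
      · have hne : (k = h) = False := by simp [hkh]
        simp only [mapItems, insertPath, hne, if_false, List.map_cons, List.mem_cons,
          Ne.symm hkh, false_or]
        rw [ih hbrest hnd.2]
        by_cases hm : h ∈ rest.map Prod.fst
        · simp [hm, mapItems, hkh]
        · simp [hm, mapItems, hkh]

lemma insert_buildTree (q : List String) :
    ∀ (ps : List (List String)) (fuel : Nat), maxLen ps ≤ fuel → q.length ≤ fuel →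
      insertPath (buildTree fuel ps) q = buildTree fuel (ps ++ [q]) := by
  induction q with
  | nil =>
      intro ps fuel _ _
      cases fuel with
      | zero => simp [buildTree, insertPath]
      | succ fu =>
          show insertPath (buildTree (fu + 1) ps) [] = buildTree (fu + 1) (ps ++ [[]])
          simp only [buildTree, stepG_eq, List.foldl_append, List.foldl_cons, List.foldl_nil]
          simp [insertPath, stepG]
  | cons h t IHq =>
      intro ps fuel hmax hlen
      cases fuel with
      | zero => simp at hlen
      | succ fu =>
          have hlt : t.length ≤ fu := by simpa using hlen
          have IH : ∀ v, maxLen v ≤ fu → insertPath (buildTree fu v) t = buildTree fu (v ++ [t]) :=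
            fun v hv => IHq v fu hv hlt
          have hnd : ((ps.foldl stepG PySem.Dict.empty).keys).Nodup :=
            nodup_foldG ps _ (by simp [PySem.Dict.empty, PySem.Dict.keys])
          have hnd' : (((ps.foldl stepG PySem.Dict.empty).items).map Prod.fst).Nodup := hnd
          have hb : ∀ p ∈ (ps.foldl stepG PySem.Dict.empty).items, maxLen p.2 ≤ fu := by
            intro p hp
            rw [maxLen_le_iff]
            intro u hu
            have := len_le_maxLen (bucket_mem ps (by simpa using hp) hu)
            simp only [List.length_cons] at this
            omega
          simp only [buildTree, stepG_eq, List.foldl_append, List.foldl_cons, List.foldl_nil]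
          rw [walk' t fu IH h _ hb hnd']
          show _ = mapItems fu (stepG (ps.foldl stepG PySem.Dict.empty) (h :: t)).items
          set d := ps.foldl stepG PySem.Dict.empty with hd
          by_cases hc : d.contains h
          · have hmem : h ∈ d.items.map Prod.fst := (PySem.Dict.contains_iff_mem_keys d h).mp hc
            rw [if_pos hmem]
            show _ = mapItems fu (d.insert h (d.getD h [] ++ [t])).items
            rw [PySem.Dict.items_insert_of_contains d _ hc]
            congr 1
            apply List.map_congr_left
            intro p hp
            by_cases hph : p.1 = h
            · have : d.getD p.1 [] = p.2 := PySem.Dict.getD_of_mem_items d (k := p.1) (v := p.2) hp hnd []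
              simp [hph, ← this]
            · simp [hph]
          · have hmem : h ∉ d.items.map Prod.fst := fun hm =>
              hc ((PySem.Dict.contains_iff_mem_keys d h).mpr hm)
            rw [if_neg hmem]
            show _ = mapItems fu (d.insert h (d.getD h [] ++ [t])).items
            rw [PySem.Dict.items_insert_of_not_contains d _ (by simpa using hc)]
            have : d.getD h [] = [] :=
              PySem.Dict.getD_of_not_contains d [] (by simpa using hc)
            rw [this]
            simp

lemma build_eq_fold (ps : List (List String)) (fuel : Nat) (h : maxLen ps ≤ fuel) :
    buildTree fuel ps = ps.foldl insertPath .nil := by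
  induction ps using List.reverseRecOn with
  | nil => simp [buildTree_nil]
  | append_singleton ps q ih =>
      have hps : maxLen ps ≤ fuel := by
        refine le_trans ?_ h
        rw [maxLen_le_iff]
        exact fun p hp => len_le_maxLen (List.mem_append_left _ hp)
      have hq : q.length ≤ fuel := le_trans (len_le_maxLen (List.mem_append_right _ (List.mem_singleton.mpr rfl))) h
      rw [List.foldl_append, List.foldl_cons, List.foldl_nil, ← ih hps,
        insert_buildTree q ps fuel hps hq]

lemma depth_insertPath (q : List String) :
    ∀ f : Forest, (insertPath f q).depth ≤ max f.depth q.length := by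
  induction q with
  | nil => intro f; simp [insertPath]
  | cons p rest ihq =>
      intro f
      induction f with
      | nil =>
          have h1 := ihq Forest.nil
          simp only [insertPath, Forest.depth, List.length_cons, Nat.max_le, le_max_iff,
            Nat.add_le_add_iff_right, Nat.zero_le, true_or, or_true, and_true] at h1 ⊢
          omega
      | cons k c r ihc ihr =>
          simp only [insertPath]
          by_cases hk : k = p
          · have h1 := ihq c
            simp only [if_pos hk, Forest.depth, List.length_cons, Nat.max_le, le_max_iff] at h1 ⊢
            omega
          · have h1 := ihr
            simp only [if_neg hk, Forest.depth, List.length_cons, Nat.max_le, le_max_iff] at h1 ⊢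
            omega

lemma depth_foldl_insert (l : List (List String)) :
    ∀ f : Forest, (l.foldl insertPath f).depth ≤ max f.depth (maxLen l) := by
  induction l with
  | nil => intro f; simp [maxLen]
  | cons q t ih =>
      intro f
      have h1 := ih (insertPath f q)
      have h2 := depth_insertPath q f
      simp only [List.foldl_cons, maxLen, List.foldr_cons, Nat.max_le, le_max_iff] at h1 h2 ⊢
      omega

-- ------- emit side -------

def J (xs : List String) : List Char := PySem.Chars.join ['\n'] (xs.map String.toList)

lemma strJoin_eq_J (xs : List String) : PySem.Str.join "\n" xs = String.ofList (J xs) := rfl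

lemma J_cons (x : String) (A : List String) :
    J (x :: A) = x.toList ++ (if A = [] then [] else '\n' :: J A) := by
  cases A with
  | nil => simp [J, PySem.Chars.join_singleton]
  | cons b B => simp [J, PySem.Chars.join_cons_cons]

lemma J_cons_ne (x : String) {A : List String} (h : A ≠ []) :
    J (x :: A) = x.toList ++ '\n' :: J A := by
  rw [J_cons, if_neg h]

lemma J_append (A C : List String) (hA : A ≠ []) (hC : C ≠ []) :
    J (A ++ C) = J A ++ '\n' :: J C := by
  induction A with
  | nil => exact absurd rfl hA
  | cons a A' ih =>
      cases A' with
      | nil => rw [List.singleton_append, J_cons, J_cons]; simp [hC]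
      | cons a2 rest =>
          rw [List.cons_append, J_cons, J_cons, ih (by simp)]
          simp

lemma items_ne_nil {f : Forest} (h : f ≠ .nil) : f.items ≠ [] := by
  cases f with
  | nil => exact absurd rfl h
  | cons k c r => simp [Forest.items]

lemma depth_pos {f : Forest} (h : f ≠ .nil) : 1 ≤ f.depth := by
  cases f with
  | nil => exact absurd rfl h
  | cons k c r => simp only [Forest.depth, le_max_iff]; left; omega

lemma depth_of_mem_items {f : Forest} {k : String} {c : Forest} :
    (k, c) ∈ f.items → c.depth < f.depth := by
  induction f with
  | nil => intro h; simp [Forest.items] at h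
  | cons k0 c0 r ihc ihr =>
      intro h
      simp only [Forest.items, List.mem_cons, Prod.mk.injEq] at h
      rcases h with ⟨_, rfl⟩ | h
      · simp only [Forest.depth, lt_max_iff]; left; omega
      · have := ihr h
        simp only [Forest.depth, lt_max_iff]
        right; exact this

lemma linesItems_ne_nil (fuel : Nat) {l : List (String × Forest)} (i : Nat) (h : l ≠ []) :
    linesItems fuel l i ≠ [] := by
  cases l with
  | nil => exact absurd rfl h
  | cons p rest =>
      obtain ⟨k, sub⟩ := p
      simp only [linesItems]
      split <;> simp

lemma emitLines_ne_nil (fuel : Nat) {l : List (String × Forest)} (i : Nat) (h : l ≠ []) :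
    emitLines fuel l i ≠ [] := by
  cases l with
  | nil => exact absurd rfl h
  | cons p rest =>
      obtain ⟨k, sub⟩ := p
      simp only [emitLines]
      split <;> simp

lemma linesB_ne_nil {fuel : Nat} {f : Forest} (i : Nat) (hf : f ≠ .nil) (hd : f.depth ≤ fuel) :
    linesB fuel f i ≠ [] := by
  cases fuel with
  | zero => exact absurd (Nat.le_trans (depth_pos hf) hd) (by omega)
  | succ fu =>
      simp only [linesB]
      exact linesItems_ne_nil fu i (by
        simpa [PySem.List.sorted_eq_nil_iff] using items_ne_nil hf)

lemma emit_eq_lines (fuel : Nat) :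
    ∀ (f : Forest) (i : Nat), f.depth ≤ fuel →
      toGraphql fuel f i = PySem.Str.join "\n" (linesB fuel f i) := by
  induction fuel with
  | zero => intro f i _; simp only [toGraphql, linesB]; rfl
  | succ fu ihf =>
      intro f i hd
      simp only [toGraphql, linesB]
      rw [strJoin_eq_J, strJoin_eq_J]
      congr 1
      have hchild : ∀ p ∈ PySem.List.sorted f.items (fun p => p.1) false, (p.2 : Forest).depth ≤ fu := by
        intro p hp
        have hm : p ∈ f.items := (PySem.List.mem_sorted _ _ _ _).mp hp
        have := depth_of_mem_items (f := f) (k := p.1) (c := p.2) (by simpa using hm)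
        omega
      generalize PySem.List.sorted f.items (fun p => p.1) false = l at hchild
      induction l with
      | nil => simp [emitLines, linesItems]
      | cons p rest ihl =>
          obtain ⟨k, sub⟩ := p
          have hsub : sub.depth ≤ fu := hchild (k, sub) (List.mem_cons_self ..)
          have hrest : ∀ p ∈ rest, (p.2 : Forest).depth ≤ fu :=
            fun p hp => hchild p (List.mem_cons_of_mem _ hp)
          have ihr := ihl hrest
          have hAB : (emitLines fu rest i = []) ↔ (linesItems fu rest i = []) := by
            constructor
            · intro hA
              cases rest with
              | nil => simp [linesItems]
              | cons r rs => exact absurd hA (emitLines_ne_nil fu i (by simp))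
            · intro hB
              cases rest with
              | nil => simp [emitLines]
              | cons r rs => exact absurd hB (linesItems_ne_nil fu i (by simp))
          simp only [emitLines, linesItems]
          by_cases hn : sub = Forest.nil
          · simp only [hn, ne_eq, not_true_eq_false, if_false, List.singleton_append]
            by_cases hB : linesItems fu rest i = []
            · have hA : emitLines fu rest i = [] := hAB.mpr hB
              rw [hA, hB]
            · have hA : emitLines fu rest i ≠ [] := fun h => hB (hAB.mp h)
              rw [J_cons_ne _ hA, J_cons_ne _ hB, ihr]
          · simp only [ne_eq, hn, not_false_eq_true, if_true]
            have hinner : linesB fu sub (i + 1) ≠ [] := linesB_ne_nil (i + 1) hn hsub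
            have htg : toGraphql fu sub (i + 1) = PySem.Str.join "\n" (linesB fu sub (i + 1)) :=
              ihf sub (i + 1) hsub
            rw [htg, strJoin_eq_J]
            simp only [List.cons_append, List.nil_append, List.append_assoc]
            have hCC : J ((indentStr i ++ "}") :: emitLines fu rest i)
                = J ((indentStr i ++ "}") :: linesItems fu rest i) := by
              by_cases hB : linesItems fu rest i = []
              · rw [hAB.mpr hB, hB]
              · rw [J_cons_ne _ (fun h => hB (hAB.mp h)), J_cons_ne _ hB, ihr]
            rw [J_cons_ne (indentStr i ++ k ++ " {")
                  (A := String.ofList (J (linesB fu sub (i + 1))) :: (indentStr i ++ "}")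
                    :: emitLines fu rest i) (by simp),
                J_cons_ne (String.ofList (J (linesB fu sub (i + 1))))
                  (A := (indentStr i ++ "}") :: emitLines fu rest i) (by simp),
                hCC,
                J_cons_ne (indentStr i ++ k ++ " {")
                  (A := linesB fu sub (i + 1) ++ (indentStr i ++ "}") :: linesItems fu rest i)
                  (by simp [hinner]),
                J_append _ _ hinner (by simp)]
            simp [List.append_assoc]

lemma maxLen_le_sum (ps : List (List String)) : maxLen ps ≤ (ps.map List.length).sum := by
  rw [maxLen_le_iff]
  intro p hp
  exact List.le_sum_of_mem (List.mem_map_of_mem hp)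

-- ===== VERDICT (by name: the statement is the Claim_ definition above) =====
theorem paths_to_graphql_fields_spec : Claim_equal_paths_to_graphql_fields := by
  intro paths _
  show paths_to_graphql_fields paths = paths_to_graphql_fields_alt paths
  unfold paths_to_graphql_fields paths_to_graphql_fields_alt
  set sps := paths.map (fun p => (PySem.Str.split? p ".").getD []) with hsps
  by_cases h : sps = []
  · simp [h]
  · simp only [if_neg h]
    set crl := commonLen sps ((PySem.List.min? (sps.map List.length) (fun x => x)).getD 0) 0 with hcrl
    set trimmed := sps.map (fun p => PySem.List.slice p (some (crl : Int)) none) with htr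
    set F := (trimmed.map List.length).sum + 1 with hF
    have hFB : (sps.map (fun p => (PySem.List.slice p (some (crl : Int)) none).length)).sum + 1 = F := by
      rw [hF, htr, List.map_map (f := fun p => PySem.List.slice p (some (crl : Int)) none)
        (g := List.length)]
      rfl
    have hroot : sps.foldl (fun root p => insertPath root (PySem.List.slice p (some (crl : Int)) none)) Forest.nil
        = trimmed.foldl insertPath Forest.nil := by
      rw [htr, List.foldl_map, hsps, List.foldl_map, List.foldl_map]
    have hmax : maxLen trimmed ≤ F := le_trans (maxLen_le_sum trimmed) (by omega)
    have hbuild : buildTree F trimmed = trimmed.foldl insertPath Forest.nil :=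
      build_eq_fold trimmed F hmax
    have hdepth : (trimmed.foldl insertPath Forest.nil).depth ≤ F := by
      have := depth_foldl_insert trimmed Forest.nil
      simp only [Forest.depth, le_max_iff] at this
      rcases this with h1 | h1
      · omega
      · exact le_trans h1 hmax
    rw [hFB, hroot, hbuild]
    exact emit_eq_lines F _ 0 hdepth
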